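-- pv_equiv track=rewrite | github.com/jjuuansee/ing-IA | Semestre 1/Programacion 1/parciales/parcial_3/ejercicio3.py | reemplazar_en
-- ===== SOURCE A (Python) =====
-- def reemplazar_en(cadena, a_reemplazar, por):
--     if len(a_reemplazar) != len(por):
--         return ""
--     cadena_nueva = ""
--     for letra in cadena:
--         if letra in a_reemplazar:
--             indice_letra = a_reemplazar.index(letra)
--             cadena_nueva += por[indice_letra]
--         else:
--             cadena_nueva += letra
--     return cadena_nueva
-- ===== SOURCE B (Python) =====
-- def reemplazar_en(cadena, a_reemplazar, por):
--     if len(a_reemplazar) != len(por):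
--         return ""
--     salida = list(cadena)
--     # transposed loops: iterate the substitution pairs, skipping keys already
--     # handled (so the first occurrence of a duplicated key wins), and stamp each
--     # pair's value over every position of the ORIGINAL string holding its key.
--     vistas = set()
--     for clave, valor in zip(a_reemplazar, por):
--         if clave in vistas:
--             continue
--         vistas.add(clave)
--         salida = [valor if c == clave else o for c, o in zip(cadena, salida)]
--     return "".join(salida)
-- ===== Notes on version B (the rewrite author's own statement) =====
-- stated objective: alternative
-- what changed: B transposes the loop structure: instead of scanning the string and searching the substitution table per character, it iterates the (key,value) pairs once, skipping keys already handled so the first occurrence of a duplicated key wins, and stamps each value over every position of the original string holding that key.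
import Mathlib
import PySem

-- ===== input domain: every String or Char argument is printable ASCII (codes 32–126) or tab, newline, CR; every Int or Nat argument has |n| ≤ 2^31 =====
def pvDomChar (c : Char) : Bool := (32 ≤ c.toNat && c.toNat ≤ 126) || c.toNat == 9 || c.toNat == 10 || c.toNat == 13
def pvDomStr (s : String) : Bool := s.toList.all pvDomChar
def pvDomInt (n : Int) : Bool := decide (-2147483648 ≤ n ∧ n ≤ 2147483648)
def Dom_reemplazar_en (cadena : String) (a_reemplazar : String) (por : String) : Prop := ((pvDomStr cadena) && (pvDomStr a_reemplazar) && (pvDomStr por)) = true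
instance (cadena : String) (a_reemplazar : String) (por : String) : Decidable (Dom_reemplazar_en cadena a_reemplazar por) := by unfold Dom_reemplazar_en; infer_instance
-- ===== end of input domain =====

-- B transposes the loops: it iterates the substitution pairs (skipping keys already
-- handled, so the first occurrence of a duplicated key wins) and stamps each value over
-- every position where the original string holds that key (alternative decomposition).

-- ===== PORT A =====
def reemplazar_en (cadena : String) (a_reemplazar : String) (por : String) : String :=
  if a_reemplazar.toList.length ≠ por.toList.length then "" else
  String.ofList (cadena.toList.foldl (fun acc letra =>
    if letra ∈ a_reemplazar.toList then
      match PySem.List.index? a_reemplazar.toList letra with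
      | some i => acc ++ [por.toList.getD i letra]
      | none => acc          -- unreachable: letra ∈ a_reemplazar
    else acc ++ [letra]) [])

-- ===== PORT B =====
-- state = (salida, vistas); the inner comprehension "[valor if c == clave else o
-- for c, o in zip(cadena, salida)]" is ported exactly as a zipWith over
-- (original string, current salida), positionwise.
def reemplazar_en_alt (cadena : String) (a_reemplazar : String) (por : String) : String :=
  if a_reemplazar.toList.length ≠ por.toList.length then "" else
  String.ofList
    ((a_reemplazar.toList.zip por.toList).foldl
      (fun st kv =>
        if PySem.Set.contains st.2 kv.1 then st
        else (List.zipWith (fun c o => if c = kv.1 then kv.2 else o) cadena.toList st.1,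
              PySem.Set.add st.2 kv.1))
      (cadena.toList, PySem.Set.empty)).1

-- ===== PRECONDITION & SPEC =====
def Spec_reemplazar_en (cadena : String) (a_reemplazar : String) (por : String) (out : String) : Prop := out = reemplazar_en_alt cadena a_reemplazar por
instance (cadena : String) (a_reemplazar : String) (por : String) (out : String) : Decidable (Spec_reemplazar_en cadena a_reemplazar por out) := by unfold Spec_reemplazar_en; infer_instance

-- ===== CLAIM (what is proved, stated in full; the proofs are below) =====
def Claim_equal_reemplazar_en : Prop := ∀ (cadena : String) (a_reemplazar : String) (por : String), Dom_reemplazar_en cadena a_reemplazar por → Spec_reemplazar_en cadena a_reemplazar por (reemplazar_en cadena a_reemplazar por)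

-- ===== LEMMAS AND PROOFS =====

-- zipWith of a list with a map of itself is pointwise
theorem zipWith_map_self (l : List Char) (f : Char → Char → Char) (h : Char → Char) :
    List.zipWith (fun c o => f c o) l (l.map h) = l.map (fun c => f c (h c)) := by
  induction l with
  | nil => rfl
  | cons x l ih => simp [ih]

-- B's fold with a seen-set computes, per original character, its first binding in ps
-- (skipping seen keys; characters already in S keep g)
theorem foldB_fwd (ps : List (Char × Char)) (l : List Char) (g : Char → Char)
    (S : PySem.Set Char) :
    (ps.foldl
      (fun st kv =>
        if PySem.Set.contains st.2 kv.1 then st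
        else (List.zipWith (fun c o => if c = kv.1 then kv.2 else o) l st.1,
              PySem.Set.add st.2 kv.1))
      (l.map g, S)).1
    = l.map (fun c => if c ∈ S then g c else
        match ps.find? (fun kv => kv.1 == c) with
        | some kv => kv.2
        | none => g c) := by
  induction ps generalizing g S with
  | nil =>
    apply Eq.symm; apply List.map_congr_left
    intro c _; split <;> rfl
  | cons kv rest ih =>
    rw [List.foldl_cons]
    by_cases hk : kv.1 ∈ S
    · rw [if_pos (by simpa [PySem.Set.contains_iff] using hk), ih]
      apply List.map_congr_left
      intro c _
      by_cases hc : c ∈ S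
      · rw [if_pos hc, if_pos hc]
      · have hne : kv.1 ≠ c := fun h => hc (h ▸ hk)
        rw [if_neg hc, if_neg hc, List.find?_cons_of_neg (by simpa using hne)]
    · rw [if_neg (by simpa [PySem.Set.contains_iff] using hk), zipWith_map_self, ih]
      apply List.map_congr_left
      intro c _
      by_cases hc : c ∈ S
      · have hcS : c ∈ PySem.Set.add S kv.1 := by
          rw [PySem.Set.mem_add]; exact Or.inl hc
        have hne : c ≠ kv.1 := fun h => hk (h ▸ hc)
        rw [if_pos hcS, if_pos hc, if_neg hne]
      · by_cases hck : c = kv.1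
        · have hcS : c ∈ PySem.Set.add S kv.1 := by
            rw [PySem.Set.mem_add]; exact Or.inr hck
          rw [if_pos hcS, if_neg hc, if_pos hck,
            List.find?_cons_of_pos (by simp [hck])]
        · have hcS : c ∉ PySem.Set.add S kv.1 := by
            rw [PySem.Set.mem_add]; rintro (h | h); exact hc h; exact hck h
          rw [if_neg hcS, if_neg hc, if_neg hck,
            List.find?_cons_of_neg (by simpa using fun h => hck h.symm)]

-- the first matching pair of (a.zip p) corresponds to a.index
theorem find_zip (a p : List Char) (c : Char) (h : a.length = p.length) :
    ((a.zip p).find? (fun kv => kv.1 == c)).map (·.2)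
      = (PySem.List.index? a c).map (fun i => p.getD i c) := by
  induction a generalizing p with
  | nil => simp [PySem.List.index?]
  | cons x a ih =>
    cases p with
    | nil => simp at h
    | cons y p =>
      simp only [List.zip_cons_cons]
      by_cases hx : x = c
      · subst hx
        rw [PySem.List.index?_cons_self, List.find?_cons_of_pos (by simp)]
        simp
      · rw [PySem.List.index?_cons_of_ne a hx,
          List.find?_cons_of_neg (by simpa using hx),
          ih p (by simpa using h), Option.map_map]
        cases PySem.List.index? a c <;> rfl

theorem reemplazar_en_spec : Claim_equal_reemplazar_en := by
  intro cadena a_reemplazar por _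
  show _ = _
  unfold reemplazar_en reemplazar_en_alt
  by_cases hlen : a_reemplazar.toList.length = por.toList.length
  · rw [if_neg (not_not_intro hlen), if_neg (not_not_intro hlen)]
    congr 1
    set a := a_reemplazar.toList
    set p := por.toList
    have hB : ((a.zip p).foldl
        (fun st kv =>
          if PySem.Set.contains st.2 kv.1 then st
          else (List.zipWith (fun c o => if c = kv.1 then kv.2 else o) cadena.toList st.1,
                PySem.Set.add st.2 kv.1))
        (cadena.toList, PySem.Set.empty)).1
        = cadena.toList.map (fun c => match (a.zip p).find? (fun kv => kv.1 == c) with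
            | some kv => kv.2
            | none => c) := by
      have := foldB_fwd (a.zip p) cadena.toList id PySem.Set.empty
      simpa [PySem.Set.empty] using this
    -- A's foldl appends one translated char per input char
    have hfold : ∀ (l : List Char) (acc : List Char),
        l.foldl (fun acc letra =>
          if letra ∈ a then
            match PySem.List.index? a letra with
            | some i => acc ++ [p.getD i letra]
            | none => acc
          else acc ++ [letra]) acc
        = acc ++ l.map (fun c => match (a.zip p).find? (fun kv => kv.1 == c) with
            | some kv => kv.2
            | none => c) := by
      intro l
      induction l with
      | nil => simp
      | cons c l ih =>
        intro acc
        rw [List.foldl_cons, List.map_cons]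
        have hfz := find_zip a p c hlen
        by_cases hc : c ∈ a
        · obtain ⟨i, hi⟩ := Option.isSome_iff_exists.mp
            ((PySem.List.index?_isSome_iff a c).mpr hc)
          rw [if_pos hc, hi, ih]
          rw [hi] at hfz
          cases hfind : (a.zip p).find? (fun kv => kv.1 == c) with
          | none => rw [hfind] at hfz; simp at hfz
          | some kv =>
            rw [hfind] at hfz
            simp only [Option.map_some] at hfz
            simpa [List.getD] using (Option.some.inj hfz).symm
        · rw [if_neg hc, ih]
          rw [(PySem.List.index?_eq_none_iff a c).mpr hc] at hfz
          cases hfind : (a.zip p).find? (fun kv => kv.1 == c) with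
          | none => simp
          | some kv => rw [hfind] at hfz; simp at hfz
    rw [hfold cadena.toList [], hB]
    simp
  · rw [if_pos hlen, if_pos hlen]
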